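-- pv_equiv track=rewrite | github.com/Team-Ferrous/Cybel | JSBuild/src/verso/Anvil/Saguaro/saguaro/analysis/pipeline_tracer.py | _resolve_entry_node
-- ===== SOURCE A (Python) =====
-- from typing import Any
--
-- def _resolve_entry_node(entry_point: str, nodes: dict[str, dict[str, Any]]) -> str | None:
--     """Resolve user-provided entry point to a graph node id."""
--     needle = (entry_point or "").strip()
--     if not needle:
--         return None
--     if needle in nodes:
--         return needle
--
--     exact_candidates: list[str] = []
--     fuzzy_candidates: list[str] = []
--     for node_id, node in nodes.items():
--         name = str(node.get("name") or "")
--         qualified = str(node.get("qualified_name") or "")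
--         entity_id = str(node.get("entity_id") or "")
--         file_path = str(node.get("file") or "")
--         joined = " ".join([node_id, name, qualified, entity_id, file_path])
--         if needle == name or needle == qualified or needle == entity_id:
--             exact_candidates.append(node_id)
--         elif needle.lower() in joined.lower():
--             fuzzy_candidates.append(node_id)
--
--         if ":" in needle and file_path:
--             file_hint, _, symbol_hint = needle.partition(":")
--             if file_hint and file_hint in file_path and symbol_hint in {name, qualified}:
--                 exact_candidates.append(node_id)
--
--     if exact_candidates:
--         return sorted(exact_candidates)[0]
--     if fuzzy_candidates:
--         fuzzy_candidates.sort(key=len)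
--         return fuzzy_candidates[0]
--     return None
-- ===== SOURCE B (Python) =====
-- def _resolve_entry_node(entry_point, nodes):
--     """Resolve user-provided entry point to a graph node id (single pass, running bests)."""
--     needle = (entry_point or "").strip()
--     if not needle:
--         return None
--     if needle in nodes:
--         return needle
--
--     has_colon = ":" in needle
--     file_hint, _, symbol_hint = needle.partition(":")
--     needle_low = needle.lower()
--
--     best_exact = None
--     best_fuzzy = None
--     best_fuzzy_len = 0
--     for node_id, node in nodes.items():
--         name = str(node.get("name") or "")
--         qualified = str(node.get("qualified_name") or "")
--         entity_id = str(node.get("entity_id") or "")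
--         file_path = str(node.get("file") or "")
--         exact = needle in (name, qualified, entity_id) or (
--             has_colon and file_path and file_hint
--             and file_hint in file_path
--             and symbol_hint in (name, qualified)
--         )
--         if exact:
--             if best_exact is None or node_id < best_exact:
--                 best_exact = node_id
--         elif needle_low in " ".join(
--             (node_id, name, qualified, entity_id, file_path)
--         ).lower():
--             if best_fuzzy is None or len(node_id) < best_fuzzy_len:
--                 best_fuzzy = node_id
--                 best_fuzzy_len = len(node_id)
--     return best_exact if best_exact is not None else best_fuzzy
-- ===== Notes on version B (the rewrite author's own statement) =====
-- stated objective: simpler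
-- what changed: B drops A's two candidate lists and the trailing sorted()/sort(key=len) passes: one loop keeps scalar running bests (lexicographically smallest exact match; first shortest fuzzy match, first-seen on ties) and hoists the needle.partition/needle.lower() work out of the loop, returning best_exact or best_fuzzy directly.
import Mathlib
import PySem

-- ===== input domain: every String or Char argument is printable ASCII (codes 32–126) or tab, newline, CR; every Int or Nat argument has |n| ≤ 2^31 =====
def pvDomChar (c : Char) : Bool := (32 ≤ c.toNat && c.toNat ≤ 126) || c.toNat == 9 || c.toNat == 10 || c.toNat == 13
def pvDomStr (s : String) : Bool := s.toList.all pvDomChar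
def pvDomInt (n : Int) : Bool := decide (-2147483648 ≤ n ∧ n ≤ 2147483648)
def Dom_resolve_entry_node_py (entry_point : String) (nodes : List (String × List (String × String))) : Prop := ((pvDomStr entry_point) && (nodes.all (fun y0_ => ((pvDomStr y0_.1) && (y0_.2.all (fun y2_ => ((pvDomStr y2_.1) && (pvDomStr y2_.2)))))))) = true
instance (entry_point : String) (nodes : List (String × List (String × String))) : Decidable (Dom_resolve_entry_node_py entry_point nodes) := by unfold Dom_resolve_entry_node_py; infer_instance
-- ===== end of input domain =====

-- B replaces A's two candidate lists + trailing sorts by scalar running bests kept in one pass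
-- (lexicographic minimum for exact matches, first shortest for fuzzy matches): simpler, no sort.


-- ===== PORT A =====

-- hand port of Python's str.partition (PySem has no partition): exact — first occurrence of
-- sep via find, then the two slices around it; used by both ports (it is library code).
def pvPartition (s sep : String) : String × String × String :=
  let i := PySem.Str.find s sep
  if i < 0 then (s, "", "")
  else (PySem.Str.slice s none (some i), sep, PySem.Str.slice s (some (i + PySem.Str.len sep)) none)

-- str(node.get(k) or ""): the inner dict's lookup; a missing key or an empty value gives "".
def pvFieldA (node : List (String × String)) (k : String) : String :=
  ((PySem.Dict.ofList node).get? k).getD ""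

-- one iteration of A's for-loop over nodes.items(), state = (exact_candidates, fuzzy_candidates)
def pvStepA (needle : String) (st : List String × List String)
    (kv : String × List (String × String)) : List String × List String :=
  let node_id := kv.1
  let name := pvFieldA kv.2 "name"
  let qualified := pvFieldA kv.2 "qualified_name"
  let entity_id := pvFieldA kv.2 "entity_id"
  let file_path := pvFieldA kv.2 "file"
  let joined := PySem.Str.join " " [node_id, name, qualified, entity_id, file_path]
  let st1 :=
    if needle == name || needle == qualified || needle == entity_id then (st.1 ++ [node_id], st.2)
    else if PySem.Str.isIn (PySem.Str.lower needle) (PySem.Str.lower joined) then (st.1, st.2 ++ [node_id])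
    else st
  if PySem.Str.isIn ":" needle && !(file_path == "") then
    let p := pvPartition needle ":"
    if !(p.1 == "") && PySem.Str.isIn p.1 file_path && (p.2.2 == name || p.2.2 == qualified) then
      (st1.1 ++ [node_id], st1.2)
    else st1
  else st1

def resolve_entry_node_py (entry_point : String) (nodes : List (String × List (String × String))) : Option String :=
  let needle := PySem.Str.strip entry_point
  if needle == "" then none
  else
    let d := PySem.Dict.ofList nodes
    if d.contains needle then some needle
    else
      let st := d.items.foldl (pvStepA needle) ([], [])
      if !(st.1 == []) then
        some (PySem.List.pyGetD (PySem.List.sorted st.1 (fun x => x)) 0 "")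
      else if !(st.2 == []) then
        some (PySem.List.pyGetD (PySem.List.sorted st.2 (fun s => PySem.Str.len s)) 0 "")
      else none

-- ===== PORT B =====

def pvFieldB (node : List (String × String)) (k : String) : String :=
  ((PySem.Dict.ofList node).get? k).getD ""

-- one iteration of B's single pass, state = (best_exact, best_fuzzy, best_fuzzy_len)
def pvStepB (needle needle_low file_hint symbol_hint : String) (has_colon : Bool)
    (st : Option String × Option String × Int)
    (kv : String × List (String × String)) : Option String × Option String × Int :=
  let node_id := kv.1
  let name := pvFieldB kv.2 "name"
  let qualified := pvFieldB kv.2 "qualified_name"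
  let entity_id := pvFieldB kv.2 "entity_id"
  let file_path := pvFieldB kv.2 "file"
  let exact :=
    (needle == name || needle == qualified || needle == entity_id) ||
      (has_colon && !(file_path == "") && !(file_hint == "") &&
        PySem.Str.isIn file_hint file_path && (symbol_hint == name || symbol_hint == qualified))
  if exact then
    match st.1 with
    | none => (some node_id, st.2)
    | some m => if node_id < m then (some node_id, st.2) else st
  else if PySem.Str.isIn needle_low
      (PySem.Str.lower (PySem.Str.join " " [node_id, name, qualified, entity_id, file_path])) then
    match st.2.1 with
    | none => (st.1, some node_id, PySem.Str.len node_id)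
    | some _ =>
      if PySem.Str.len node_id < st.2.2 then (st.1, some node_id, PySem.Str.len node_id) else st
  else st

def resolve_entry_node_py_alt (entry_point : String) (nodes : List (String × List (String × String))) : Option String :=
  let needle := PySem.Str.strip entry_point
  if needle == "" then none
  else
    let d := PySem.Dict.ofList nodes
    if d.contains needle then some needle
    else
      let has_colon := PySem.Str.isIn ":" needle
      let p := pvPartition needle ":"
      let needle_low := PySem.Str.lower needle
      let st := d.items.foldl (pvStepB needle needle_low p.1 p.2.2 has_colon) (none, none, 0)
      match st.1 with
      | some m => some m
      | none => st.2.1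

-- ===== PRECONDITION & SPEC =====
def Spec_resolve_entry_node_py (entry_point : String) (nodes : List (String × List (String × String))) (out : Option String) : Prop := out = resolve_entry_node_py_alt entry_point nodes
instance (entry_point : String) (nodes : List (String × List (String × String))) (out : Option String) : Decidable (Spec_resolve_entry_node_py entry_point nodes out) := by unfold Spec_resolve_entry_node_py; infer_instance

-- ===== CLAIM (what is proved, stated in full; the proofs are below) =====
def Claim_equal_resolve_entry_node_py : Prop := ∀ (entry_point : String) (nodes : List (String × List (String × String))), Dom_resolve_entry_node_py entry_point nodes → Spec_resolve_entry_node_py entry_point nodes (resolve_entry_node_py entry_point nodes)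

-- ===== LEMMAS AND PROOFS =====

-- running minimum under a key, as B maintains it
def pvMinStep {κ : Type} [LT κ] [DecidableLT κ] (key : String → κ) (b : Option String) (x : String) : Option String :=
  match b with
  | none => some x
  | some m => if key x < key m then some x else some m

-- head of the stable sort = left fold of the running minimum (strict '<', first winner kept)
theorem head?_foldl_insertBy {κ : Type} [LT κ] [DecidableLT κ] (key : String → κ)
    (l : List String) (acc : List String) :
    (l.foldl (fun acc x => PySem.List.insertBy (fun a b => decide (key a < key b)) x acc) acc).head?
      = l.foldl (pvMinStep key) acc.head? := by
  induction l generalizing acc with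
  | nil => rfl
  | cons x l ih =>
    simp only [List.foldl_cons, ih]
    congr 1
    cases acc with
    | nil => rfl
    | cons y ys =>
      simp only [PySem.List.insertBy, pvMinStep]
      split <;> simp_all
theorem head?_sorted_eq_fold {κ : Type} [LT κ] [DecidableLT κ] (key : String → κ) (xs : List String) :
    (PySem.List.sorted xs key).head? = xs.foldl (pvMinStep key) none := by
  rw [PySem.List.sorted_eq_foldl_insertBy]
  exact head?_foldl_insertBy key xs []

theorem pvMinStep_idem {κ : Type} [LinearOrder κ] (key : String → κ) (b : Option String) (x : String) :
    pvMinStep key (pvMinStep key b x) x = pvMinStep key b x := by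
  cases b with
  | none => simp [pvMinStep]
  | some m =>
    by_cases h : key x < key m
    · simp [pvMinStep, h]
    · simp [pvMinStep, h]

theorem pvMinFold_ne_none {κ : Type} [LT κ] [DecidableLT κ] (key : String → κ)
    (l : List String) (b : Option String) (h : l ≠ [] ∨ b ≠ none) :
    l.foldl (pvMinStep key) b ≠ none := by
  induction l generalizing b with
  | nil => simpa using h.resolve_left (by simp)
  | cons x l ih =>
    simp only [List.foldl_cons]
    apply ih
    right
    cases b <;> simp [pvMinStep] <;> split <;> simp

-- B's fuzzy state: the stored length is the length of the stored best
def pvFzStep (st : Option String × Int) (x : String) : Option String × Int :=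
  match st.1 with
  | none => (some x, PySem.Str.len x)
  | some _ => if PySem.Str.len x < st.2 then (some x, PySem.Str.len x) else st

theorem pvFzFold_fst (l : List String) (b : Option String) (n : Int)
    (h : ∀ m, b = some m → n = PySem.Str.len m) :
    (l.foldl pvFzStep (b, n)).1 = l.foldl (pvMinStep (fun s => PySem.Str.len s)) b := by
  induction l generalizing b n with
  | nil => rfl
  | cons x l ih =>
    simp only [List.foldl_cons]
    cases b with
    | none => exact ih _ _ (by simp)
    | some m =>
      have hn := h m rfl
      subst hn
      simp only [pvFzStep, pvMinStep]
      by_cases hx : PySem.Str.len x < PySem.Str.len m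
      · rw [if_pos hx, if_pos hx]
        exact ih (some x) _ (by intro m' hm'; cases hm'; rfl)
      · rw [if_neg hx, if_neg hx]
        exact ih (some m) _ (by intro m' hm'; cases hm'; rfl)

-- the coupling invariant of the two loops
theorem pvMinUpd_eq (bst : Option String × Option String × Int) (x : String) :
    (match bst.1 with
      | none => (some x, bst.2)
      | some m => if x < m then (some x, bst.2) else bst)
    = (pvMinStep (fun y => y) bst.1 x, bst.2) := by
  obtain ⟨b1, b2⟩ := bst
  cases b1 with
  | none => rfl
  | some m => simp only [pvMinStep]; split <;> rfl

theorem pvFzUpd_eq (bst : Option String × Option String × Int) (x : String) :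
    (match bst.2.1 with
      | none => (bst.1, some x, PySem.Str.len x)
      | some _ => if PySem.Str.len x < bst.2.2 then (bst.1, some x, PySem.Str.len x) else bst)
    = (bst.1, pvFzStep bst.2 x) := by
  obtain ⟨b1, b2, b3⟩ := bst
  cases b2 with
  | none => rfl
  | some m => simp only [pvFzStep]; split <;> rfl

theorem pvCore (c1 fu ho b1 b2 b3 : Bool) (node_id : String)
    (ex fz : List String) (bst : Option String × Option String × Int)
    (h1 : bst.1 = ex.foldl (pvMinStep (fun x => x)) none)
    (h2 : ex = [] → bst.2 = fz.foldl pvFzStep (none, 0)) :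
    ((if c1 || ho && b1 && b2 && b3 then
        (match bst.1 with
          | none => (some node_id, bst.2)
          | some m => if node_id < m then (some node_id, bst.2) else bst)
      else if fu then
        (match bst.2.1 with
          | none => (bst.1, some node_id, PySem.Str.len node_id)
          | some _ => if PySem.Str.len node_id < bst.2.2 then (bst.1, some node_id, PySem.Str.len node_id) else bst)
      else bst) : Option String × Option String × Int).1
      = (if ho then
            (if b1 && b2 && b3 then
              ((if c1 then (ex ++ [node_id], fz) else if fu then (ex, fz ++ [node_id]) else (ex, fz)).1 ++ [node_id],
               (if c1 then (ex ++ [node_id], fz) else if fu then (ex, fz ++ [node_id]) else (ex, fz)).2)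
            else (if c1 then (ex ++ [node_id], fz) else if fu then (ex, fz ++ [node_id]) else (ex, fz)))
          else (if c1 then (ex ++ [node_id], fz) else if fu then (ex, fz ++ [node_id]) else (ex, fz))).1.foldl (pvMinStep (fun x => x)) none
    ∧ ((if ho then
            (if b1 && b2 && b3 then
              ((if c1 then (ex ++ [node_id], fz) else if fu then (ex, fz ++ [node_id]) else (ex, fz)).1 ++ [node_id],
               (if c1 then (ex ++ [node_id], fz) else if fu then (ex, fz ++ [node_id]) else (ex, fz)).2)
            else (if c1 then (ex ++ [node_id], fz) else if fu then (ex, fz ++ [node_id]) else (ex, fz)))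
          else (if c1 then (ex ++ [node_id], fz) else if fu then (ex, fz ++ [node_id]) else (ex, fz))).1 = [] →
        ((if c1 || ho && b1 && b2 && b3 then
            (match bst.1 with
              | none => (some node_id, bst.2)
              | some m => if node_id < m then (some node_id, bst.2) else bst)
          else if fu then
            (match bst.2.1 with
              | none => (bst.1, some node_id, PySem.Str.len node_id)
              | some _ => if PySem.Str.len node_id < bst.2.2 then (bst.1, some node_id, PySem.Str.len node_id) else bst)
          else bst) : Option String × Option String × Int).2
          = (if ho then
                (if b1 && b2 && b3 then
                  ((if c1 then (ex ++ [node_id], fz) else if fu then (ex, fz ++ [node_id]) else (ex, fz)).1 ++ [node_id],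
                   (if c1 then (ex ++ [node_id], fz) else if fu then (ex, fz ++ [node_id]) else (ex, fz)).2)
                else (if c1 then (ex ++ [node_id], fz) else if fu then (ex, fz ++ [node_id]) else (ex, fz)))
              else (if c1 then (ex ++ [node_id], fz) else if fu then (ex, fz ++ [node_id]) else (ex, fz))).2.foldl pvFzStep (none, 0)) := by
  rw [pvMinUpd_eq, pvFzUpd_eq]
  cases c1 <;> cases fu <;> cases ho <;> cases b1 <;> cases b2 <;> cases b3 <;>
    simp_all [List.foldl_append, pvMinStep_idem]

theorem pvStep_rel (needle : String) (kv : String × List (String × String))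
    (ex fz : List String) (bst : Option String × Option String × Int)
    (h1 : bst.1 = ex.foldl (pvMinStep (fun x => x)) none)
    (h2 : ex = [] → bst.2 = fz.foldl pvFzStep (none, 0)) :
    (pvStepB needle (PySem.Str.lower needle) (pvPartition needle ":").1 (pvPartition needle ":").2.2 (PySem.Str.isIn ":" needle) bst kv).1
      = (pvStepA needle (ex, fz) kv).1.foldl (pvMinStep (fun x => x)) none
    ∧ ((pvStepA needle (ex, fz) kv).1 = [] →
        (pvStepB needle (PySem.Str.lower needle) (pvPartition needle ":").1 (pvPartition needle ":").2.2 (PySem.Str.isIn ":" needle) bst kv).2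
          = (pvStepA needle (ex, fz) kv).2.foldl pvFzStep (none, 0)) := by
  obtain ⟨node_id, node⟩ := kv
  dsimp only [pvStepA, pvStepB, pvFieldA, pvFieldB]
  exact pvCore _ _ _ _ _ _ node_id ex fz bst h1 h2
theorem loop_equiv (needle : String) (l : List (String × List (String × String)))
    (ast : List String × List String) (bst : Option String × Option String × Int)
    (h1 : bst.1 = ast.1.foldl (pvMinStep (fun x => x)) none)
    (h2 : ast.1 = [] → bst.2 = ast.2.foldl pvFzStep (none, 0)) :
    (l.foldl (pvStepB needle (PySem.Str.lower needle) (pvPartition needle ":").1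
        (pvPartition needle ":").2.2 (PySem.Str.isIn ":" needle)) bst).1
      = (l.foldl (pvStepA needle) ast).1.foldl (pvMinStep (fun x => x)) none
    ∧ ((l.foldl (pvStepA needle) ast).1 = [] →
      (l.foldl (pvStepB needle (PySem.Str.lower needle) (pvPartition needle ":").1
          (pvPartition needle ":").2.2 (PySem.Str.isIn ":" needle)) bst).2
        = (l.foldl (pvStepA needle) ast).2.foldl pvFzStep (none, 0)) := by
  induction l generalizing ast bst with
  | nil => exact ⟨h1, h2⟩
  | cons kv l ih =>
    simp only [List.foldl_cons]
    obtain ⟨g1, g2⟩ := pvStep_rel needle kv ast.1 ast.2 bst h1 h2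
    exact ih (pvStepA needle ast kv) _ g1 g2

theorem head?_of_ne_nil (l : List String) (h : l ≠ []) :
    some (PySem.List.pyGetD l 0 "") = l.head? := by
  cases l with
  | nil => exact absurd rfl h
  | cons a t => simp [PySem.List.pyGetD_zero]

theorem final_equiv (needle : String) (l : List (String × List (String × String))) :
    (if !((l.foldl (pvStepA needle) ([], [])).1 == []) then
        some (PySem.List.pyGetD (PySem.List.sorted (l.foldl (pvStepA needle) ([], [])).1 (fun x => x)) 0 "")
      else if !((l.foldl (pvStepA needle) ([], [])).2 == []) then
        some (PySem.List.pyGetD (PySem.List.sorted (l.foldl (pvStepA needle) ([], [])).2 (fun s => PySem.Str.len s)) 0 "")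
      else none)
    = (match (l.foldl (pvStepB needle (PySem.Str.lower needle) (pvPartition needle ":").1
          (pvPartition needle ":").2.2 (PySem.Str.isIn ":" needle)) (none, none, 0)).1 with
      | some m => some m
      | none => (l.foldl (pvStepB needle (PySem.Str.lower needle) (pvPartition needle ":").1
          (pvPartition needle ":").2.2 (PySem.Str.isIn ":" needle)) (none, none, 0)).2.1) := by
  obtain ⟨g1, g2⟩ := loop_equiv needle l ([], []) (none, none, 0) rfl (fun _ => rfl)
  generalize hA : l.foldl (pvStepA needle) ([], []) = ast at g1 g2 ⊢
  generalize hB : l.foldl (pvStepB needle (PySem.Str.lower needle) (pvPartition needle ":").1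
      (pvPartition needle ":").2.2 (PySem.Str.isIn ":" needle)) (none, none, 0) = bst at g1 g2 ⊢
  by_cases hex : ast.1 = []
  · have hb1 : bst.1 = none := by rw [g1, hex]; rfl
    have hfz : bst.2 = ast.2.foldl pvFzStep (none, 0) := g2 hex
    have hcalc : bst.2.1 = (PySem.List.sorted ast.2 (fun s => PySem.Str.len s)).head? := by
      rw [hfz, head?_sorted_eq_fold]
      exact pvFzFold_fst ast.2 none 0 (fun m hm => by cases hm)
    rw [hb1, hex]
    by_cases hf : ast.2 = []
    · simp [hf, hfz]
    · rw [hcalc, ← head?_of_ne_nil _ (by simp [PySem.List.sorted_eq_nil_iff, hf])]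
      simp [hf]
  · have hne : bst.1 ≠ none := by rw [g1]; exact pvMinFold_ne_none _ _ _ (Or.inl hex)
    obtain ⟨m, hm⟩ := Option.ne_none_iff_exists'.mp hne
    have hs : some m = (PySem.List.sorted ast.1 (fun x => x)).head? := by
      rw [head?_sorted_eq_fold, ← g1, hm]
    rw [← head?_of_ne_nil _ (by simp [PySem.List.sorted_eq_nil_iff, hex])] at hs
    rw [hm]
    simp [hex]
    exact Option.some.inj hs.symm

-- ===== VERDICT (by name: the statement is the Claim_ definition above) =====
theorem resolve_entry_node_py_spec : Claim_equal_resolve_entry_node_py := by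
  intro entry nodes _
  unfold Spec_resolve_entry_node_py resolve_entry_node_py resolve_entry_node_py_alt
  by_cases h0 : (PySem.Str.strip entry == "") = true
  · simp only [h0, if_true]
  · simp only [h0, Bool.false_eq_true, if_false]
    by_cases h1 : (PySem.Dict.ofList nodes).contains (PySem.Str.strip entry) = true
    · simp only [h1, if_true]
    · simp only [h1, Bool.false_eq_true, if_false]
      exact final_equiv (PySem.Str.strip entry) (PySem.Dict.ofList nodes).items
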